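-- pv_equiv track=rewrite | github.com/carlosemv/cobra | examples/iristar/gen_scene.py | circle_offsets
-- ===== SOURCE A (Python) =====
-- def circle_offsets(radius):
--     x = 0
--     y = radius
--
--     d = 1 - radius
--     dl = 3
--     dse = -2*y + 5
--
--     yield (x, y)
--     while y > x:
--         if (d < 0):
--             d += dl
--             dse += 2
--         else:
--             d += dse
--             dse += 4
--             y -= 1
--         dl += 2
--         x += 1
--         yield (x, y)
-- ===== SOURCE B (Python) =====
-- def circle_offsets(radius):
--     # Direct rasterization: for each column x, y is the nearest integer to
--     # sqrt(radius^2 - x^2), never dropping by more than one per column (which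
--     # keeps the octant arc 8-connected).  The floor square root f is maintained
--     # incrementally, so the whole octant costs O(radius) like any scanline.
--     x = 0
--     y = radius
--     f = radius  # floor(sqrt(radius^2 - x^2)), maintained as x grows
--     yield (x, y)
--     while y > x:
--         x += 1
--         n = radius * radius - x * x
--         while f * f > n:
--             f -= 1
--         t = f + 1 if (2 * f + 1) * (2 * f + 1) < 4 * n else f
--         y = max(t, y - 1)
--         yield (x, y)
-- ===== Notes on version B (the rewrite author's own statement) =====
-- stated objective: alternative
-- what changed: Replaces the incremental midpoint decision variables (d, dl, dse) with a direct per-column computation: y is the nearest integer to the square root of the remaining squared radius, obtained from an incrementally maintained floor square root and clamped to drop at most one row per column.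
import Mathlib
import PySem

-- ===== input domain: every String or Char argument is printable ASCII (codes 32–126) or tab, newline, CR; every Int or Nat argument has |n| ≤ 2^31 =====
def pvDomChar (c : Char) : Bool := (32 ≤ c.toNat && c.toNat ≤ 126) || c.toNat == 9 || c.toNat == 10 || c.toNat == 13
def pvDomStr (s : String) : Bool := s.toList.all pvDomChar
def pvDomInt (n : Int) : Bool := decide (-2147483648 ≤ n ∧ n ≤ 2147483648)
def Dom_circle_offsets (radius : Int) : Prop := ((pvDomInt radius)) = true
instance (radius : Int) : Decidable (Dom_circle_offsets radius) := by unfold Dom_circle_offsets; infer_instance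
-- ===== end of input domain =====

-- B replaces A's incremental midpoint decision variables (d, dl, dse) with a
-- direct per-column computation of y: the nearest integer to sqrt(r^2 - x^2),
-- obtained from an incrementally maintained floor square root, and clamped to
-- drop at most one row per column (which keeps the octant arc 8-connected).
-- Objective: alternative (same exact output).  The Nat fuel arguments below
-- are totality guards only, always large enough for the guarded loop.

-- ===== PORT A =====
def circleALoop : Nat → Int → Int → Int → Int → Int → List (Int × Int)
  | 0, _, _, _, _, _ => []
  | fuel + 1, x, y, d, dl, dse =>
    if y > x then
      if d < 0 then
        (x + 1, y) :: circleALoop fuel (x + 1) y (d + dl) (dl + 2) (dse + 2)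
      else
        (x + 1, y - 1) :: circleALoop fuel (x + 1) (y - 1) (d + dse) (dl + 2) (dse + 4)
    else []

def circle_offsets (radius : Int) : List (Int × Int) :=
  -- y - x starts at radius and falls by at least one per iteration
  (0, radius) :: circleALoop radius.toNat 0 radius (1 - radius) 3 (-2 * radius + 5)

-- ===== PORT B =====
-- Source B's inner 'while f * f > n: f -= 1' (f falls to 0 at the latest, so
-- f.toNat steps of fuel always suffice)
def dropLoop : Nat → Int → Int → Int
  | 0, _, f => f
  | fuel + 1, n, f => if f * f > n then dropLoop fuel n (f - 1) else f

def circleBLoop : Nat → Int → Int → Int → Int → List (Int × Int)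
  | 0, _, _, _, _ => []
  | fuel + 1, r, x, y, f =>
    if y > x then
      let n := r * r - (x + 1) * (x + 1)
      let f' := dropLoop f.toNat n f
      let t := if (2 * f' + 1) * (2 * f' + 1) < 4 * n then f' + 1 else f'
      let y' := max t (y - 1)
      (x + 1, y') :: circleBLoop fuel r (x + 1) y' f'
    else []

def circle_offsets_alt (radius : Int) : List (Int × Int) :=
  (0, radius) :: circleBLoop radius.toNat radius 0 radius radius

-- ===== PRECONDITION & SPEC =====
def Spec_circle_offsets (radius : Int) (out : List (Int × Int)) : Prop := out = circle_offsets_alt radius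
instance (radius : Int) (out : List (Int × Int)) : Decidable (Spec_circle_offsets radius out) := by unfold Spec_circle_offsets; infer_instance

-- ===== CLAIM (what is proved, stated in full; the proofs are below) =====
def Claim_equal_circle_offsets : Prop := ∀ (radius : Int), Dom_circle_offsets radius → Spec_circle_offsets radius (circle_offsets radius)

-- ===== LEMMAS AND PROOFS =====
-- dropLoop computes the floor square root of n when started at or above it
theorem dropLoop_correct : ∀ (k : Nat) (n f : Int), f.toNat ≤ k → 0 ≤ n → 0 ≤ f →
    n < (f + 1) * (f + 1) →
    0 ≤ dropLoop k n f ∧ dropLoop k n f * dropLoop k n f ≤ n ∧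
      n < (dropLoop k n f + 1) * (dropLoop k n f + 1) ∧ dropLoop k n f ≤ f := by
  intro k
  induction k with
  | zero =>
    intro n f hk hn hf hub
    have hf0 : f = 0 := by omega
    subst hf0
    exact ⟨le_refl 0, by simpa [dropLoop] using hn, by simpa [dropLoop] using hub, le_refl 0⟩
  | succ k ih =>
    intro n f hk hn hf hub
    rw [dropLoop]
    split_ifs with h
    · have hf1 : 1 ≤ f := by
        rcases (by omega : f = 0 ∨ 1 ≤ f) with h0 | h1
        · subst h0; simp at h; omega
        · exact h1
      have := ih n (f - 1) (by omega) hn (by omega) (by nlinarith)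
      exact ⟨this.1, this.2.1, this.2.2.1, by omega⟩
    · exact ⟨hf, by omega, hub, le_refl f⟩

-- rounding the floor square root z of m to the nearest integer
theorem pvRoundEq (m z y : Int) (hy : 1 ≤ y) (hz0 : 0 ≤ z)
    (hz1 : z * z ≤ m) (hz2 : m < (z + 1) * (z + 1))
    (hlow : y * y - y < m) (hhigh : m ≤ y * y + y) :
    (if (2 * z + 1) * (2 * z + 1) < 4 * m then z + 1 else z) = y := by
  have hzy : z ≤ y := by nlinarith
  have hzy' : y - 1 ≤ z := by nlinarith
  rcases (by omega : z = y ∨ z = y - 1) with h | h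
  · rw [if_neg (by rw [h]; nlinarith)]; exact h
  · rw [if_pos (by rw [h]; nlinarith)]; omega

theorem pvRoundLe (m z y : Int) (hy : 1 ≤ y) (hz0 : 0 ≤ z)
    (hz1 : z * z ≤ m) (hhigh : m ≤ y * y - y) :
    (if (2 * z + 1) * (2 * z + 1) < 4 * m then z + 1 else z) ≤ y - 1 := by
  have hzy : z ≤ y - 1 := by nlinarith
  split_ifs with h
  · rcases (by omega : z = y - 1 ∨ z ≤ y - 2) with h1 | h1
    · exfalso; rw [h1] at h; nlinarith
    · omega
  · exact hzy

theorem loops_eq : ∀ (k : Nat) (r x y f d dl dse : Int),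
    0 ≤ x →
    d = (x + 1) * (x + 1) + y * y - y - r * r →
    dl = 2 * x + 3 →
    dse = 2 * (x - y) + 5 →
    r * r - x * x ≤ y * y + y →
    (y > x → y * y - y < r * r - x * x) →
    0 ≤ f → f * f ≤ r * r - x * x → r * r - x * x < (f + 1) * (f + 1) →
    circleALoop k x y d dl dse = circleBLoop k r x y f := by
  intro k
  induction k with
  | zero => intro r x y f d dl dse _ _ _ _ _ _ _ _ _; rfl
  | succ k ih =>
    intro r x y f d dl dse hx hd hdl hdse hn hlo hf0 hf1 hf2
    rw [circleALoop, circleBLoop]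
    by_cases hyx : y > x
    · rw [if_pos hyx, if_pos hyx]
      simp only []
      have hsq : (x + 1) * (x + 1) = x * x + 2 * x + 1 := by ring
      have hxx : x * x - x ≥ 0 := by nlinarith [mul_self_nonneg (x - 1)]
      have hlo' := hlo hyx
      -- the next column still lies inside the circle
      have hm0 : (0:Int) ≤ r * r - (x + 1) * (x + 1) := by nlinarith
      obtain ⟨hz0, hz1, hz2, hzf⟩ := dropLoop_correct f.toNat (r * r - (x + 1) * (x + 1)) f
        (le_refl _) hm0 hf0 (by nlinarith)
      set z := dropLoop f.toNat (r * r - (x + 1) * (x + 1)) f with hz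
      by_cases hdlt : d < 0
      · -- keep y: the nearest row in column x+1 is still y
        have ht : (if (2 * z + 1) * (2 * z + 1) < 4 * (r * r - (x + 1) * (x + 1)) then z + 1 else z) = y := by
          apply pvRoundEq _ _ _ (by omega) hz0 hz1 hz2
          · nlinarith
          · nlinarith
        rw [if_pos hdlt, ht, max_eq_left (by omega : y - 1 ≤ y)]
        congr 1
        apply ih r (x + 1) y z (d + dl) (dl + 2) (dse + 2) (by omega)
        · rw [hd, hdl]; ring
        · omega
        · omega
        · nlinarith
        · intro _; nlinarith
        · exact hz0
        · exact hz1
        · exact hz2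
      · -- decrement: the nearest row is at most y - 1, the clamp picks y - 1
        have ht : (if (2 * z + 1) * (2 * z + 1) < 4 * (r * r - (x + 1) * (x + 1)) then z + 1 else z) ≤ y - 1 := by
          apply pvRoundLe _ _ _ (by omega) hz0 hz1
          nlinarith
        have hmax : max (if (2 * z + 1) * (2 * z + 1) < 4 * (r * r - (x + 1) * (x + 1)) then z + 1 else z) (y - 1) = y - 1 :=
          max_eq_right ht
        rw [if_neg hdlt, hmax]
        congr 1
        apply ih r (x + 1) (y - 1) z (d + dse) (dl + 2) (dse + 4) (by omega)
        · rw [hd, hdse]; ring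
        · omega
        · omega
        · nlinarith
        · -- if the loop continues, the new row still lies strictly inside
          intro hcont
          by_contra hc
          push Not at hc
          nlinarith
        · exact hz0
        · exact hz1
        · exact hz2
    · rw [if_neg hyx, if_neg hyx]

-- ===== VERDICT (by name: the statement is the Claim_ definition above) =====
theorem circle_offsets_spec : Claim_equal_circle_offsets := by
  intro r _
  unfold Spec_circle_offsets circle_offsets circle_offsets_alt
  congr 1
  rcases (by omega : 0 ≤ r ∨ r < 0) with hr | hr
  · apply loops_eq r.toNat r 0 r r (1 - r) 3 (-2 * r + 5) (by omega)
    · ring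
    · ring
    · ring
    · nlinarith
    · intro h; nlinarith
    · exact hr
    · nlinarith
    · nlinarith
  · have h0 : r.toNat = 0 := by omega
    rw [h0]; rfl
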